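-- pv_equiv track=rewrite | github.com/pricekid/CalmMindAI | run_emergency.py | html_from_newlines
-- ===== SOURCE A (Python) =====
-- def html_from_newlines(text):
--     """Convert newlines to HTML paragraph breaks."""
--     if not text:
--         return ""
--     paragraphs = text.split('\n\n')
--     result = ""
--     for p in paragraphs:
--         p_with_breaks = p.replace('\n', '<br>')
--         result += f'<p>{p_with_breaks}</p>'
--     return result
-- ===== SOURCE B (Python) =====
-- def html_from_newlines(text):
--     """Convert newlines to HTML paragraph breaks."""
--     if not text:
--         return ""
--     return '<p>' + text.replace('\n\n', '</p><p>').replace('\n', '<br>') + '</p>'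
-- ===== Notes on version B (the rewrite author's own statement) =====
-- stated objective: idiomatic
-- what changed: Replaces A's split-into-paragraphs loop that wraps and concatenates each piece with a flat pair of string replacements ('\n\n' -> '</p><p>', then '\n' -> '<br>') between one opening and one closing tag.
import Mathlib
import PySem

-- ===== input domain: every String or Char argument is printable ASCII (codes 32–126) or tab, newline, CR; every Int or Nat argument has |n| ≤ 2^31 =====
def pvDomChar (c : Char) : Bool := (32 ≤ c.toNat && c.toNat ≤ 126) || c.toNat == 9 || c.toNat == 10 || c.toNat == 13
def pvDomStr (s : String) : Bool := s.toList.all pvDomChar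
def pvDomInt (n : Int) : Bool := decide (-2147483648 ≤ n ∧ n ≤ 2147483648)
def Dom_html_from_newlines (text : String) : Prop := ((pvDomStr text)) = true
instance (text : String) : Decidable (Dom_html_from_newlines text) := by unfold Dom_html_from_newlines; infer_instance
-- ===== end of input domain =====

-- B replaces A's split-and-loop with two flat string replacements (idiomatic; same cost class).

-- ===== PORT A =====
def html_from_newlines (text : String) : String :=
  if text == "" then ""
  else
    let paragraphs := (PySem.Str.split? text "\n\n").getD []
    paragraphs.foldl (fun result p =>
      let p_with_breaks := PySem.Str.replace p "\n" "<br>"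
      result ++ ("<p>" ++ p_with_breaks ++ "</p>")) ""

-- ===== PORT B =====
def html_from_newlines_alt (text : String) : String :=
  if text == "" then ""
  else "<p>" ++ PySem.Str.replace (PySem.Str.replace text "\n\n" "</p><p>") "\n" "<br>" ++ "</p>"

-- ===== PRECONDITION & SPEC =====
def Spec_html_from_newlines (text : String) (out : String) : Prop := out = html_from_newlines_alt text
instance (text : String) (out : String) : Decidable (Spec_html_from_newlines text out) := by unfold Spec_html_from_newlines; infer_instance

-- ===== CLAIM (what is proved, stated in full; the proofs are below) =====
def Claim_equal_html_from_newlines : Prop := ∀ (text : String), Dom_html_from_newlines text → Spec_html_from_newlines text (html_from_newlines text)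

-- ===== LEMMAS AND PROOFS =====

-- single-char replacement '\n' -> '<br>', as a simple structural recursion
def rep1R : List Char → List Char
  | [] => []
  | c :: t => (if c = '\n' then ['<','b','r','>'] else [c]) ++ rep1R t

-- replacement of '\n\n' by '</p><p>'
def rep2R : List Char → List Char
  | [] => []
  | [c] => [c]
  | c :: d :: t =>
    if c = '\n' ∧ d = '\n' then ['<','/','p','>','<','p','>'] ++ rep2R t
    else c :: rep2R (d :: t)

-- split on '\n\n'
def splitR : List Char → List (List Char)
  | [] => [[]]
  | [c] => [[c]]
  | c :: d :: t =>
    if c = '\n' ∧ d = '\n' then [] :: splitR t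
    else (splitR (d :: t)).modifyHead (c :: ·)

-- join with '</p><p>' after per-piece rep1R
def JR : List (List Char) → List Char
  | [] => []
  | [p] => rep1R p
  | p :: ps => rep1R p ++ ['<','/','p','>','<','p','>'] ++ JR ps

lemma splitR_ne_nil (l : List Char) : splitR l ≠ [] := by
  fun_induction splitR l with
  | case4 c d t h ih =>
      obtain ⟨p, ps, hs⟩ := List.exists_cons_of_ne_nil ih
      simp [hs, List.modifyHead]
  | _ => simp

lemma modifyHead_id (l : List (List Char)) : List.modifyHead (fun x => x) l = l := by
  cases l <;> simp

lemma rep1R_tag : rep1R ['<','/','p','>','<','p','>'] = ['<','/','p','>','<','p','>'] := by decide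

lemma rep1R_append (a b : List Char) : rep1R (a ++ b) = rep1R a ++ rep1R b := by
  induction a with
  | nil => simp [rep1R]
  | cons c t ih => simp [rep1R, ih]

lemma replace_go1_spec : ∀ (fuel : Nat) (l acc : List Char), l.length ≤ fuel →
    PySem.Chars.replace.go ['\n'] ['<','b','r','>'] fuel l acc = acc.reverse ++ rep1R l := by
  intro fuel
  induction fuel with
  | zero =>
      intro l acc h
      have : l = [] := by cases l <;> simp_all
      subst this
      simp [PySem.Chars.replace.go, rep1R]
  | succ n ih =>
      intro l acc h
      cases l with
      | nil => simp [PySem.Chars.replace.go, rep1R]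
      | cons c t =>
          by_cases hc : c = '\n'
          · subst hc
            have hp : (['\n'] : List Char).isPrefixOf ('\n' :: t) = true := by
              simp [List.isPrefixOf]
            simp only [PySem.Chars.replace.go, hp, if_pos]
            rw [ih _ _ (by simp_all; try omega)]
            simp [rep1R]
          · have hp : (['\n'] : List Char).isPrefixOf (c :: t) = false := by
              simp [List.isPrefixOf]; exact fun hh => absurd hh.symm hc
            simp only [PySem.Chars.replace.go, hp, Bool.false_eq_true, if_false]
            rw [ih _ _ (by simp_all; try omega)]
            simp [rep1R, hc]

lemma replace_go2_spec : ∀ (fuel : Nat) (l acc : List Char), l.length ≤ fuel →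
    PySem.Chars.replace.go ['\n','\n'] ['<','/','p','>','<','p','>'] fuel l acc = acc.reverse ++ rep2R l := by
  intro fuel
  induction fuel with
  | zero =>
      intro l acc h
      have : l = [] := by cases l <;> simp_all
      subst this
      simp [PySem.Chars.replace.go, rep2R]
  | succ n ih =>
      intro l acc h
      cases l with
      | nil => simp [PySem.Chars.replace.go, rep2R]
      | cons c t =>
          by_cases hc : c = '\n' ∧ t.head? = some '\n'
          · obtain ⟨hc1, hc2⟩ := hc
            obtain ⟨t', rfl⟩ : ∃ t', t = '\n' :: t' := by
              cases t with
              | nil => simp at hc2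
              | cons d t' => simp at hc2; exact ⟨t', by rw [hc2]⟩
            subst hc1
            have hp : (['\n','\n'] : List Char).isPrefixOf ('\n' :: '\n' :: t') = true := by
              simp [List.isPrefixOf]
            simp only [PySem.Chars.replace.go, hp, if_pos]
            rw [ih _ _ (by simp_all; try omega)]
            simp [rep2R]
          · have hp : (['\n','\n'] : List Char).isPrefixOf (c :: t) = false := by
              cases t with
              | nil => simp [List.isPrefixOf]
              | cons d t' =>
                  simp [List.isPrefixOf]
                  intro h1 h2
                  exact hc ⟨h1.symm, by simp [h2.symm]⟩
            simp only [PySem.Chars.replace.go, hp, Bool.false_eq_true, if_false]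
            rw [ih _ _ (by simp_all; try omega)]
            cases t with
            | nil => simp [rep2R]
            | cons d t' =>
                have hcd : ¬ (c = '\n' ∧ d = '\n') := by
                  intro ⟨h1, h2⟩; exact hc ⟨h1, by simp [h2]⟩
                simp [rep2R, hcd]

lemma splitOn_go_spec : ∀ (fuel : Nat) (l cur : List Char) (acc : List (List Char)), l.length ≤ fuel →
    PySem.Chars.splitOn.go ['\n','\n'] fuel l cur acc
      = acc.reverse ++ (splitR l).modifyHead (cur.reverse ++ ·) := by
  intro fuel
  induction fuel with
  | zero =>
      intro l cur acc h
      have : l = [] := by cases l <;> simp_all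
      subst this
      simp [PySem.Chars.splitOn.go, splitR, List.modifyHead]
  | succ n ih =>
      intro l cur acc h
      cases l with
      | nil => simp [PySem.Chars.splitOn.go, splitR, List.modifyHead]
      | cons c t =>
          by_cases hc : c = '\n' ∧ t.head? = some '\n'
          · obtain ⟨hc1, hc2⟩ := hc
            obtain ⟨t', rfl⟩ : ∃ t', t = '\n' :: t' := by
              cases t with
              | nil => simp at hc2
              | cons d t' => simp at hc2; exact ⟨t', by rw [hc2]⟩
            subst hc1
            have hp : (['\n','\n'] : List Char).isPrefixOf ('\n' :: '\n' :: t') = true := by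
              simp [List.isPrefixOf]
            simp only [PySem.Chars.splitOn.go, hp, if_pos]
            rw [ih _ _ _ (by simp_all; try omega)]
            obtain ⟨p, ps, hs⟩ := List.exists_cons_of_ne_nil (splitR_ne_nil t')
            simp [splitR, List.modifyHead, hs]
          · have hp : (['\n','\n'] : List Char).isPrefixOf (c :: t) = false := by
              cases t with
              | nil => simp [List.isPrefixOf]
              | cons d t' =>
                  simp [List.isPrefixOf]
                  intro h1 h2
                  exact hc ⟨h1.symm, by simp [h2.symm]⟩
            simp only [PySem.Chars.splitOn.go, hp, Bool.false_eq_true, if_false]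
            rw [ih _ _ _ (by simp_all; try omega)]
            cases t with
            | nil =>
                simp [splitR, List.modifyHead]
            | cons d t' =>
                have hcd : ¬ (c = '\n' ∧ d = '\n') := by
                  intro ⟨h1, h2⟩; exact hc ⟨h1, by simp [h2]⟩
                simp only [splitR, if_neg hcd]
                obtain ⟨p, ps, hps⟩ := List.exists_cons_of_ne_nil (splitR_ne_nil (d :: t'))
                simp [hps, List.modifyHead]

lemma chars_replace1 (l : List Char) : PySem.Chars.replace l ['\n'] ['<','b','r','>'] = rep1R l := by
  simp [PySem.Chars.replace, replace_go1_spec l.length l [] le_rfl]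

lemma chars_replace2 (l : List Char) :
    PySem.Chars.replace l ['\n','\n'] ['<','/','p','>','<','p','>'] = rep2R l := by
  simp [PySem.Chars.replace, replace_go2_spec l.length l [] le_rfl]

lemma chars_splitOn (l : List Char) : PySem.Chars.splitOn l ['\n','\n'] = splitR l := by
  simp [PySem.Chars.splitOn, splitOn_go_spec (l.length + 1) l [] [] (by omega), modifyHead_id]

lemma JR_cons_head (c : Char) (parts : List (List Char)) (h : parts ≠ []) :
    JR (parts.modifyHead (c :: ·)) = (if c = '\n' then ['<','b','r','>'] else [c]) ++ JR parts := by
  obtain ⟨p, ps, rfl⟩ := List.exists_cons_of_ne_nil h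
  cases ps <;> simp [JR, rep1R, List.modifyHead]

lemma JR_nil_cons (parts : List (List Char)) (h : parts ≠ []) :
    JR ([] :: parts) = ['<','/','p','>','<','p','>'] ++ JR parts := by
  obtain ⟨p, ps, rfl⟩ := List.exists_cons_of_ne_nil h
  simp [JR, rep1R]

lemma main1 (l : List Char) : rep1R (rep2R l) = JR (splitR l) := by
  fun_induction rep2R l with
  | case1 => simp [rep1R, splitR, JR]
  | case2 c => simp [rep1R, splitR, JR]
  | case3 c d t h ih =>
      simp only [splitR, if_pos h, rep1R_append, rep1R_tag,
        JR_nil_cons _ (splitR_ne_nil t), ih]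
  | case4 c d t h ih =>
      simp only [splitR, if_neg h]
      rw [JR_cons_head _ _ (splitR_ne_nil (d :: t)), ← ih, rep1R]

lemma fold_spec : ∀ (parts : List String) (init : String),
    (parts.foldl (fun result p => result ++ ("<p>" ++ PySem.Str.replace p "\n" "<br>" ++ "</p>")) init).toList
      = init.toList ++ (parts.map (fun p => ['<','p','>'] ++ rep1R p.toList ++ ['<','/','p','>'])).flatten := by
  intro parts
  induction parts with
  | nil => simp
  | cons p ps ih =>
      intro init
      simp only [List.foldl_cons, ih, List.map_cons, List.flatten_cons, String.toList_append]
      have : (PySem.Str.replace p "\n" "<br>").toList = rep1R p.toList := by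
        rw [PySem.Str.toList_replace]
        have h1 : ("\n" : String).toList = ['\n'] := by decide
        have h2 : ("<br>" : String).toList = ['<','b','r','>'] := by decide
        rw [h1, h2, chars_replace1]
      rw [this]
      have hp : ("<p>" : String).toList = ['<','p','>'] := by decide
      have hq : ("</p>" : String).toList = ['<','/','p','>'] := by decide
      simp [hp, hq]

lemma wrap_flatten (parts : List (List Char)) (h : parts ≠ []) :
    (parts.map (fun p => ['<','p','>'] ++ rep1R p ++ ['<','/','p','>'])).flatten
      = ['<','p','>'] ++ JR parts ++ ['<','/','p','>'] := by
  induction parts with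
  | nil => exact absurd rfl h
  | cons p ps ih =>
      cases ps with
      | nil => simp [JR]
      | cons q qs =>
          simp only [List.map_cons, List.flatten_cons] at ih ⊢
          rw [ih (by simp)]
          simp [JR]

-- ===== VERDICT (by name: the statement is the Claim_ definition above) =====
theorem html_from_newlines_spec : Claim_equal_html_from_newlines := by
  intro text _
  unfold Spec_html_from_newlines html_from_newlines html_from_newlines_alt
  by_cases h : text = ""
  · simp [h]
  · have hne : (text == "") = false := by simpa using h
    simp only [hne, Bool.false_eq_true, if_false]
    have hsep : ("\n\n" : String).toList = ['\n','\n'] := by decide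
    have hsplit : (PySem.Str.split? text "\n\n").getD []
        = (splitR text.toList).map String.ofList := by
      simp [PySem.Str.split?, PySem.Chars.split?, hsep, chars_splitOn]
    have hA : (List.foldl (fun result p =>
          result ++ ("<p>" ++ PySem.Str.replace p "\n" "<br>" ++ "</p>")) ""
          ((PySem.Str.split? text "\n\n").getD [])).toList
        = ['<','p','>'] ++ rep1R (rep2R text.toList) ++ ['<','/','p','>'] := by
      rw [hsplit, fold_spec]
      rw [List.map_map]
      have hmap : ((fun p => ['<','p','>'] ++ rep1R (String.toList p) ++ ['<','/','p','>'])
            ∘ String.ofList) = (fun p => ['<','p','>'] ++ rep1R p ++ ['<','/','p','>']) := by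
        funext p; simp [String.toList_ofList]
      rw [hmap, wrap_flatten _ (splitR_ne_nil text.toList), main1]
      simp
    have hB : ("<p>" ++ PySem.Str.replace (PySem.Str.replace text "\n\n" "</p><p>") "\n" "<br>" ++ "</p>").toList
        = ['<','p','>'] ++ rep1R (rep2R text.toList) ++ ['<','/','p','>'] := by
      simp only [String.toList_append, PySem.Str.toList_replace]
      have h1 : ("\n" : String).toList = ['\n'] := by decide
      have h2 : ("<br>" : String).toList = ['<','b','r','>'] := by decide
      have h3 : ("</p><p>" : String).toList = ['<','/','p','>','<','p','>'] := by decide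
      have h4 : ("<p>" : String).toList = ['<','p','>'] := by decide
      have h5 : ("</p>" : String).toList = ['<','/','p','>'] := by decide
      rw [h1, h2, h3, h4, h5, hsep, chars_replace2, chars_replace1]
    calc List.foldl (fun result p =>
            result ++ ("<p>" ++ PySem.Str.replace p "\n" "<br>" ++ "</p>")) ""
            ((PySem.Str.split? text "\n\n").getD [])
        = String.ofList (List.foldl (fun result p =>
            result ++ ("<p>" ++ PySem.Str.replace p "\n" "<br>" ++ "</p>")) ""
            ((PySem.Str.split? text "\n\n").getD [])).toList := (String.ofList_toList).symm
      _ = String.ofList ("<p>" ++ PySem.Str.replace (PySem.Str.replace text "\n\n" "</p><p>") "\n" "<br>" ++ "</p>").toList := by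
            rw [hA, hB]
      _ = _ := String.ofList_toList
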